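-- pv_equiv track=rewrite | github.com/godwin15/LeetLearn | try.py | reduce_sum
-- ===== SOURCE A (Python) =====
-- import heapq
--
-- def reduce_sum(lst):
--     heapq.heapify(lst)
--     s = 0
--     while len(lst) > 1:
--         first = heapq.heappop(lst)
--         second = heapq.heappop(lst)
--         s += first + second
--         heapq.heappush(lst, first + second)
--     return s
-- ===== SOURCE B (Python) =====
-- from collections import deque
--
-- def reduce_sum(lst):
--     # sort once, then the linear two-queue merge: originals in q1, merged sums
--     # appended to q2; each step pops the smaller front twice. Leaves lst in the
--     # same final state as the heap version (lst becomes [total] when len >= 2).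
--     lst.sort()
--     q1 = deque(lst)
--     q2 = deque()
--     s = 0
--     while len(q1) + len(q2) > 1:
--         a = q1.popleft() if q1 and (not q2 or q1[0] <= q2[0]) else q2.popleft()
--         b = q1.popleft() if q1 and (not q2 or q1[0] <= q2[0]) else q2.popleft()
--         s += a + b
--         q2.append(a + b)
--     lst[:] = list(q1) + list(q2)
--     return s
-- ===== Notes on version B (the rewrite author's own statement) =====
-- stated objective: faster
-- what changed: Replaces the binary heap (heapify/heappop/heappush) by sorting once and running the linear two-queue merge: originals in one queue, merged sums appended to a second queue, each step popping the smaller of the two fronts; merged sums come out nondecreasing so the second queue needs no ordering work.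
import Mathlib
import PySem

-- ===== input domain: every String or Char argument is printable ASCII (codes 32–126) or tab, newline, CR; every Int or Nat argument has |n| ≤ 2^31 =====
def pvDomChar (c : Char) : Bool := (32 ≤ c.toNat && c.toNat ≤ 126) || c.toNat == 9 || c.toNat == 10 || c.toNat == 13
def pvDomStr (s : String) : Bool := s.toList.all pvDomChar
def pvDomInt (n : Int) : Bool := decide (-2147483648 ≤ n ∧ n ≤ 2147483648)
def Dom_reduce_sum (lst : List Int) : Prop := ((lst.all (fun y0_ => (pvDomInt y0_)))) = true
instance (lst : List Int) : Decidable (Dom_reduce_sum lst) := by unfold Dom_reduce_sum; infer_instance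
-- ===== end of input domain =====

-- B replaces A's binary heap by sort-once + the linear two-queue merge; the
-- equivalence proved here is about the RETURN value (both Pythons also leave
-- lst in the same final state: [total] when len >= 2, unchanged otherwise).

-- ===== PORT A =====
-- heapq is modelled by its contract on the popped VALUES: heappop returns the
-- minimum of the current multiset and removes one occurrence of it, heappush
-- adds an element; exact for the returned sum s.
def minOf : List Int → Int
  | [] => 0          -- unreachable: only called on nonempty lists
  | a :: t => t.foldl min a

theorem minOf_mem : ∀ (l : List Int), l ≠ [] → minOf l ∈ l := by
  intro l hl
  match l with
  | a :: t =>
    simp only [minOf]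
    have : ∀ (t : List Int) (a : Int), t.foldl min a = a ∨ t.foldl min a ∈ t := by
      intro t
      induction t with
      | nil => intro a; left; rfl
      | cons b t ih =>
        intro a
        rcases ih (min a b) with h | h
        · rcases le_total a b with hab | hab
          · left; simpa [List.foldl, min_eq_left hab] using h
          · right; simp only [List.foldl] at h ⊢
            rw [h, min_eq_right hab]; exact List.mem_cons_self
        · right; exact List.mem_cons_of_mem _ h
    rcases this t a with h | h
    · rw [h]; exact List.mem_cons_self
    · exact List.mem_cons_of_mem _ h

def loopA (s : Int) (l : List Int) : Int :=
  if h : 1 < l.length then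
    let m1 := minOf l
    let l1 := l.erase m1
    let m2 := minOf l1
    let l2 := l1.erase m2
    loopA (s + m1 + m2) (l2 ++ [m1 + m2])
  else s
termination_by l.length
decreasing_by
  have h1 : minOf l ∈ l := minOf_mem l (by intro he; simp [he] at h)
  have hl1 : (l.erase (minOf l)).length = l.length - 1 := List.length_erase_of_mem h1
  have hne : l.erase (minOf l) ≠ [] := by
    intro he
    have := congrArg List.length he
    simp [hl1] at this; omega
  have h2 : minOf (l.erase (minOf l)) ∈ l.erase (minOf l) := minOf_mem _ hne
  have hl2 := List.length_erase_of_mem h2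
  simp only [List.length_append, List.length_cons, List.length_nil, hl2, hl1]
  omega

def reduce_sum (lst : List Int) : Int := loopA 0 lst

-- ===== PORT B =====
-- the `q1.popleft() if q1 and (not q2 or q1[0] <= q2[0]) else q2.popleft()` pop
def popQ : List Int → List Int → Int × List Int × List Int
  | a :: t1, [] => (a, t1, [])
  | [], c :: t2 => (c, [], t2)
  | a :: t1, c :: t2 => if a ≤ c then (a, t1, c :: t2) else (c, a :: t1, t2)
  | [], [] => (0, [], [])   -- unreachable: the loop guarantees a nonempty pool

theorem popQ_length : ∀ (q1 q2 : List Int), q1 ++ q2 ≠ [] →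
    (popQ q1 q2).2.1.length + (popQ q1 q2).2.2.length + 1 = q1.length + q2.length := by
  intro q1 q2 h
  match q1, q2 with
  | [], [] => simp at h
  | a :: t1, [] => simp [popQ]
  | [], c :: t2 => simp [popQ]
  | a :: t1, c :: t2 =>
    by_cases hac : a ≤ c <;> simp [popQ, hac] <;> omega

def loopB2 (s : Int) (q1 q2 : List Int) : Int :=
  if h : 1 < q1.length + q2.length then
    loopB2 (s + (popQ q1 q2).1 + (popQ (popQ q1 q2).2.1 (popQ q1 q2).2.2).1)
      (popQ (popQ q1 q2).2.1 (popQ q1 q2).2.2).2.1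
      ((popQ (popQ q1 q2).2.1 (popQ q1 q2).2.2).2.2
        ++ [(popQ q1 q2).1 + (popQ (popQ q1 q2).2.1 (popQ q1 q2).2.2).1])
  else s
termination_by q1.length + q2.length
decreasing_by
  have hne1 : q1 ++ q2 ≠ [] := by
    intro he
    have hz : (q1 ++ q2).length = 0 := by rw [he]; rfl
    rw [List.length_append] at hz; omega
  have e1 := popQ_length q1 q2 hne1
  have hne2 : (popQ q1 q2).2.1 ++ (popQ q1 q2).2.2 ≠ [] := by
    intro he
    have hz : ((popQ q1 q2).2.1 ++ (popQ q1 q2).2.2).length = 0 := by rw [he]; rfl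
    rw [List.length_append] at hz; omega
  have e2 := popQ_length _ _ hne2
  simp only [List.length_append, List.length_cons, List.length_nil]
  omega

def reduce_sum_alt (lst : List Int) : Int :=
  loopB2 0 (PySem.List.sorted lst (fun x => x) false) []

-- ===== PRECONDITION & SPEC =====
def Spec_reduce_sum (lst : List Int) (out : Int) : Prop := out = reduce_sum_alt lst
instance (lst : List Int) (out : Int) : Decidable (Spec_reduce_sum lst out) := by unfold Spec_reduce_sum; infer_instance

-- ===== CLAIM (what is proved, stated in full; the proofs are below) =====
def Claim_equal_reduce_sum : Prop := ∀ (lst : List Int), Dom_reduce_sum lst → Spec_reduce_sum lst (reduce_sum lst)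

-- ===== LEMMAS AND PROOFS =====

theorem foldl_min_init {t : List Int} (a : Int) : t.foldl min a ≤ a := by
  induction t generalizing a with
  | nil => exact le_refl _
  | cons b t ih => exact le_trans (ih (a := min a b)) (min_le_left _ _)

theorem foldl_min_le {t : List Int} {a x : Int} (hx : x ∈ t) : t.foldl min a ≤ x := by
  induction t generalizing a with
  | nil => cases hx
  | cons b t ih =>
    rcases List.mem_cons.mp hx with h | hx
    · subst h
      simp only [List.foldl]
      exact le_trans (foldl_min_init (min a x)) (min_le_right a x)
    · exact ih hx

theorem minOf_le {l : List Int} {x : Int} (hx : x ∈ l) : minOf l ≤ x := by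
  cases l with
  | nil => cases hx
  | cons a t =>
    rcases List.mem_cons.mp hx with h | hx
    · subst h; exact foldl_min_init _
    · exact foldl_min_le hx

theorem minOf_eq_of {l : List Int} {m : Int} (hm : m ∈ l) (hle : ∀ x ∈ l, m ≤ x) :
    minOf l = m :=
  le_antisymm (minOf_le hm) (hle _ (minOf_mem l (List.ne_nil_of_mem hm)))

theorem minOf_perm {l l' : List Int} (hp : l.Perm l') (hne : l ≠ []) :
    minOf l = minOf l' := by
  have hne' : l' ≠ [] := fun h => hne ((h ▸ hp).eq_nil)
  have h1 : minOf l ∈ l' := hp.mem_iff.mp (minOf_mem l hne)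
  have h2 : minOf l' ∈ l := hp.mem_iff.mpr (minOf_mem l' hne')
  exact le_antisymm (minOf_le h2) (minOf_le h1)

theorem loopA_perm : ∀ (n : Nat) (s : Int) (l l' : List Int),
    l.length = n → l.Perm l' → loopA s l = loopA s l' := by
  intro n
  induction n using Nat.strong_induction_on with
  | _ n ih =>
    intro s l l' hn hp
    have hlen : l'.length = l.length := (hp.length_eq).symm
    conv_lhs => rw [loopA]
    conv_rhs => rw [loopA]
    by_cases h : 1 < l.length
    · have h' : 1 < l'.length := by omega
      simp only [h, h', dif_pos]
      have hne : l ≠ [] := by intro he; simp [he] at h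
      have hm1 : minOf l = minOf l' := minOf_perm hp hne
      rw [← hm1]
      have hperase : (l.erase (minOf l)).Perm (l'.erase (minOf l)) := hp.erase _
      have hl1len : (l.erase (minOf l)).length = l.length - 1 :=
        List.length_erase_of_mem (minOf_mem l hne)
      have hl1ne : l.erase (minOf l) ≠ [] := by
        intro he; rw [he] at hl1len; simp at hl1len; omega
      have hm2 : minOf (l.erase (minOf l)) = minOf (l'.erase (minOf l)) :=
        minOf_perm hperase hl1ne
      rw [← hm2]
      have hperase2 : ((l.erase (minOf l)).erase (minOf (l.erase (minOf l)))).Perm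
          ((l'.erase (minOf l)).erase (minOf (l.erase (minOf l)))) := hperase.erase _
      have hl2len := List.length_erase_of_mem (minOf_mem _ hl1ne)
      have hlt : ((l.erase (minOf l)).erase (minOf (l.erase (minOf l))) ++
          [minOf l + minOf (l.erase (minOf l))]).length < n := by
        simp only [List.length_append, List.length_cons, List.length_nil, hl2len, hl1len]
        omega
      exact ih _ hlt _ _ _ rfl (hperase2.append_right _)
    · have h' : ¬ 1 < l'.length := by omega
      simp [h, h']

theorem foldl_min_of_le : ∀ (t : List Int) (a : Int), (∀ x ∈ t, a ≤ x) → t.foldl min a = a := by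
  intro t
  induction t with
  | nil => intro a _; rfl
  | cons b t ih =>
    intro a h
    simp only [List.foldl]
    rw [min_eq_left (h b List.mem_cons_self)]
    exact ih a (fun x hx => h x (List.mem_cons_of_mem _ hx))

theorem head_le_of_sorted {a : Int} {t : List Int}
    (h : (a :: t).Pairwise (fun x y : Int => x ≤ y)) : ∀ x ∈ a :: t, a ≤ x := by
  intro x hx
  rcases List.mem_cons.mp hx with h' | hx
  · subst h'; exact le_refl _
  · exact (List.pairwise_cons.mp h).1 x hx

theorem minOf_sorted_head {a : Int} {t : List Int}
    (h : (a :: t).Pairwise (fun x y : Int => x ≤ y)) : minOf (a :: t) = a := by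
  simp only [minOf]
  exact foldl_min_of_le t a (List.pairwise_cons.mp h).1

-- the two-queue pop takes the minimum of the pool and removes its first occurrence
theorem popQ_fst {q1 q2 : List Int} (h1 : q1.Pairwise (fun x y : Int => x ≤ y))
    (h2 : q2.Pairwise (fun x y : Int => x ≤ y)) (hne : q1 ++ q2 ≠ []) :
    (popQ q1 q2).1 = minOf (q1 ++ q2) := by
  match q1, q2 with
  | [], [] => simp at hne
  | a :: t1, [] => simp [popQ, minOf_sorted_head h1]
  | [], c :: t2 => simp [popQ, minOf_sorted_head h2]
  | a :: t1, c :: t2 =>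
    by_cases hac : a ≤ c
    · simp only [popQ, if_pos hac]
      refine (minOf_eq_of List.mem_cons_self ?_).symm
      intro x hx
      rcases List.mem_cons.mp hx with h' | hx
      · subst h'; exact le_refl _
      · rcases List.mem_append.mp hx with hx | hx
        · exact (List.pairwise_cons.mp h1).1 x hx
        · exact le_trans hac (head_le_of_sorted h2 x hx)
    · push_cast at hac
      simp only [popQ, if_neg hac]
      refine (minOf_eq_of (List.mem_append.mpr (Or.inr List.mem_cons_self)) ?_).symm
      intro x hx
      have hca : c ≤ a := le_of_not_ge hac
      rcases List.mem_append.mp hx with hx | hx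
      · exact le_trans hca (head_le_of_sorted h1 x hx)
      · exact head_le_of_sorted h2 x hx

theorem popQ_append {q1 q2 : List Int} (h1 : q1.Pairwise (fun x y : Int => x ≤ y))
    (hne : q1 ++ q2 ≠ []) :
    (popQ q1 q2).2.1 ++ (popQ q1 q2).2.2 = (q1 ++ q2).erase (popQ q1 q2).1 := by
  match q1, q2 with
  | [], [] => simp at hne
  | a :: t1, [] => simp [popQ]
  | [], c :: t2 => simp [popQ]
  | a :: t1, c :: t2 =>
    by_cases hac : a ≤ c
    · simp [popQ, if_pos hac]
    · have hca : c < a := lt_of_not_ge hac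
      simp only [popQ, if_neg hac]
      have hnotin : c ∉ a :: t1 := by
        intro hmem
        exact absurd (head_le_of_sorted h1 c hmem) (not_le.mpr hca)
      rw [List.erase_append_right _ hnotin, List.erase_cons_head]

theorem popQ_sorted1 {q1 q2 : List Int} (h1 : q1.Pairwise (fun x y : Int => x ≤ y)) :
    (popQ q1 q2).2.1.Pairwise (fun x y : Int => x ≤ y) := by
  match q1, q2 with
  | [], [] => simp [popQ]
  | a :: t1, [] => exact (List.pairwise_cons.mp h1).2
  | [], c :: t2 => simp [popQ]
  | a :: t1, c :: t2 =>
    by_cases hac : a ≤ c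
    · simpa [popQ, hac] using (List.pairwise_cons.mp h1).2
    · simpa [popQ, hac] using h1

theorem popQ_sorted2 {q1 q2 : List Int} (h2 : q2.Pairwise (fun x y : Int => x ≤ y)) :
    (popQ q1 q2).2.2.Pairwise (fun x y : Int => x ≤ y) := by
  match q1, q2 with
  | [], [] => simp [popQ]
  | a :: t1, [] => simp [popQ]
  | [], c :: t2 => simpa [popQ] using (List.pairwise_cons.mp h2).2
  | a :: t1, c :: t2 =>
    by_cases hac : a ≤ c
    · simpa [popQ, hac] using h2
    · simpa [popQ, hac] using (List.pairwise_cons.mp h2).2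

theorem popQ_sub2 {q1 q2 : List Int} : ∀ x ∈ (popQ q1 q2).2.2, x ∈ q2 := by
  match q1, q2 with
  | [], [] => simp [popQ]
  | a :: t1, [] => simp [popQ]
  | [], c :: t2 => intro x hx; simp only [popQ] at hx; exact List.mem_cons_of_mem _ hx
  | a :: t1, c :: t2 =>
    by_cases hac : a ≤ c
    · intro x hx; simpa [popQ, hac] using hx
    · intro x hx; simp only [popQ, if_neg hac] at hx; exact List.mem_cons_of_mem _ hx

-- loop invariant: the elements of q2 that survive the next two pops are ≤ the next merged sum
def Cinv (q1 q2 : List Int) : Prop :=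
  ∀ s ∈ (popQ (popQ q1 q2).2.1 (popQ q1 q2).2.2).2.2,
    s ≤ (popQ q1 q2).1 + (popQ (popQ q1 q2).2.1 (popQ q1 q2).2.2).1

theorem Cinv_nil : ∀ (q1 : List Int), Cinv q1 [] := by
  intro q1
  match q1 with
  | [] => intro s hs; simp [popQ] at hs
  | [a] => intro s hs; simp [popQ] at hs
  | a :: b :: t => intro s hs; simp [popQ] at hs

theorem Cinv_next {q1'' q2'' : List Int} {a b : Int} (hab : a ≤ b)
    (hq2 : ∀ s ∈ q2'', s ≤ a + b) (hge : ∀ x ∈ q1'' ++ q2'', b ≤ x)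
    (h1 : q1''.Pairwise (fun x y : Int => x ≤ y))
    (h2 : q2''.Pairwise (fun x y : Int => x ≤ y)) :
    Cinv q1'' (q2'' ++ [a + b]) := by
  have hsort2 : (q2'' ++ [a + b]).Pairwise (fun x y : Int => x ≤ y) := by
    rw [List.pairwise_append]
    exact ⟨h2, List.pairwise_singleton _ _, by intro x hx y hy; simp at hy; subst hy; exact hq2 x hx⟩
  set N2 := q2'' ++ [a + b] with hN2
  have hne : q1'' ++ N2 ≠ [] := by
    intro he
    have := congrArg List.length he
    simp [hN2] at this
  intro s hs
  -- facts about the first pop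
  have ha' := popQ_fst h1 hsort2 hne
  have happ1 := popQ_append h1 hne
  have hs1 := popQ_sorted1 (q2 := N2) h1
  have hs2 := popQ_sorted2 (q1 := q1'') hsort2
  -- is the pool after one pop empty?
  by_cases hone : (popQ q1'' N2).2.1 ++ (popQ q1'' N2).2.2 = []
  · rcases List.append_eq_nil_iff.mp hone with ⟨e1, e2⟩
    rw [e1, e2] at hs
    simp [popQ] at hs
  · have ha'' := popQ_fst hs1 hs2 hone
    have happ2 := popQ_append hs1 hone
    -- names for the two popped values
    have hsmem2 : s ∈ (popQ (popQ q1'' N2).2.1 (popQ q1'' N2).2.2).2.1 ++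
        (popQ (popQ q1'' N2).2.1 (popQ q1'' N2).2.2).2.2 := List.mem_append_right _ hs
    rw [happ2, happ1] at hsmem2
    have hsN2 : s ∈ N2 := popQ_sub2 _ (popQ_sub2 _ hs)
    have hsle : s ≤ a + b := by
      rcases List.mem_append.mp hsN2 with h | h
      · exact hq2 s h
      · simp at h; omega
    -- b' ≤ s
    have hsmem1 : s ∈ ((q1'' ++ N2).erase (popQ q1'' N2).1) := List.mem_of_mem_erase hsmem2
    have hb's : (popQ (popQ q1'' N2).2.1 (popQ q1'' N2).2.2).1 ≤ s := by
      rw [ha'', happ1]; exact minOf_le hsmem1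
    -- a' ≤ b'
    have hb'mem : (popQ (popQ q1'' N2).2.1 (popQ q1'' N2).2.2).1 ∈
        ((q1'' ++ N2).erase (popQ q1'' N2).1) := by
      rw [ha'', happ1]
      exact minOf_mem _ (by rw [← happ1]; exact hone)
    have hb'NP : (popQ (popQ q1'' N2).2.1 (popQ q1'' N2).2.2).1 ∈ q1'' ++ N2 :=
      List.mem_of_mem_erase hb'mem
    have ha'mem : (popQ q1'' N2).1 ∈ q1'' ++ N2 := by
      rw [ha']; exact minOf_mem _ hne
    have ha'b' : (popQ q1'' N2).1 ≤ (popQ (popQ q1'' N2).2.1 (popQ q1'' N2).2.2).1 := by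
      rw [ha']; exact minOf_le hb'NP
    -- every pool element is ≥ b or equals a+b
    have hNP : ∀ x ∈ q1'' ++ N2, b ≤ x ∨ x = a + b := by
      intro x hx
      rcases List.mem_append.mp hx with hx | hx
      · exact Or.inl (hge x (List.mem_append_left _ hx))
      · rcases List.mem_append.mp hx with hx | hx
        · exact Or.inl (hge x (List.mem_append_right _ hx))
        · simp at hx; exact Or.inr hx
    set va := (popQ q1'' N2).1 with hva
    set vb := (popQ (popQ q1'' N2).2.1 (popQ q1'' N2).2.2).1 with hvb
    by_cases hA : b ≤ va
    · by_cases hB : b ≤ vb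
      · omega
      · -- vb < b, but b ≤ va ≤ vb: contradiction
        omega
    · -- va < b, so va = a + b
      rcases hNP va ha'mem with h | h
      · omega
      · by_cases hB : b ≤ vb
        · -- s ≤ a+b = va < b ≤ vb ≤ s: contradiction
          omega
        · -- vb < b, so vb = a + b too: two copies of a+b in the pool,
          -- hence a+b occurs in q1''++q2'', hence b ≤ a+b = vb < b: contradiction
          rcases hNP vb hb'NP with h' | h'
          · omega
          · exfalso
            have h1c : 0 < ((q1'' ++ N2).erase va).count (a + b) := by
              rw [List.count_pos_iff]
              exact h' ▸ hb'mem
            have hces := List.count_erase_self (a := va) (l := q1'' ++ N2)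
            rw [h] at h1c hces
            have hcount : 2 ≤ (q1'' ++ N2).count (a + b) := by omega
            have hsplit : (q1'' ++ N2).count (a + b) = (q1'' ++ q2'').count (a + b) + 1 := by
              simp [hN2, List.count_append]
              omega
            have hpos : 0 < (q1'' ++ q2'').count (a + b) := by omega
            have hmm : (a + b) ∈ q1'' ++ q2'' := List.count_pos_iff.mp hpos
            have := hge _ hmm
            omega

theorem loopB2_eq_loopA : ∀ (n : Nat) (s : Int) (q1 q2 : List Int),
    q1.length + q2.length = n → q1.Pairwise (fun x y : Int => x ≤ y) →
    q2.Pairwise (fun x y : Int => x ≤ y) → Cinv q1 q2 →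
    loopB2 s q1 q2 = loopA s (q1 ++ q2) := by
  intro n
  induction n using Nat.strong_induction_on with
  | _ n ih =>
    intro s q1 q2 hn h1 h2 hC
    conv_lhs => rw [loopB2]
    conv_rhs => rw [loopA]
    by_cases h : 1 < q1.length + q2.length
    · have hlen : 1 < (q1 ++ q2).length := by
        simp only [List.length_append]; omega
      simp only [h, hlen, dif_pos]
      have hne1 : q1 ++ q2 ≠ [] := by
        intro he
        have hz : (q1 ++ q2).length = 0 := by rw [he]; rfl
        rw [List.length_append] at hz; omega
      have ha := popQ_fst h1 h2 hne1
      have happ1 := popQ_append h1 hne1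
      have hs1 := popQ_sorted1 (q2 := q2) h1
      have hs2 := popQ_sorted2 (q1 := q1) h2
      have hamem : (popQ q1 q2).1 ∈ q1 ++ q2 := ha ▸ minOf_mem _ hne1
      have hlen1 : ((q1 ++ q2).erase (popQ q1 q2).1).length = q1.length + q2.length - 1 := by
        rw [List.length_erase_of_mem hamem]; simp
      have hne2 : (popQ q1 q2).2.1 ++ (popQ q1 q2).2.2 ≠ [] := by
        intro he
        rw [happ1] at he
        have := congrArg List.length he
        rw [hlen1] at this; simp at this; omega
      have hb := popQ_fst hs1 hs2 hne2
      have happ2 := popQ_append hs1 hne2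
      rw [happ1] at hb happ2
      have hbmem : (popQ (popQ q1 q2).2.1 (popQ q1 q2).2.2).1 ∈
          (q1 ++ q2).erase (popQ q1 q2).1 := hb ▸ minOf_mem _ (by
            intro he; have := congrArg List.length he; rw [hlen1] at this; simp at this; omega)
      -- rewrite the RHS minima as the popped values
      rw [← ha, ← hb]
      -- IH hypotheses for the next state
      have hss1 := popQ_sorted1 (q2 := (popQ q1 q2).2.2) hs1
      have hss2 := popQ_sorted2 (q1 := (popQ q1 q2).2.1) hs2
      have hCq : ∀ x ∈ (popQ (popQ q1 q2).2.1 (popQ q1 q2).2.2).2.2,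
          x ≤ (popQ q1 q2).1 + (popQ (popQ q1 q2).2.1 (popQ q1 q2).2.2).1 := hC
      have hab : (popQ q1 q2).1 ≤ (popQ (popQ q1 q2).2.1 (popQ q1 q2).2.2).1 := by
        rw [ha]; exact minOf_le (List.mem_of_mem_erase hbmem)
      have hge : ∀ x ∈ (popQ (popQ q1 q2).2.1 (popQ q1 q2).2.2).2.1 ++
          (popQ (popQ q1 q2).2.1 (popQ q1 q2).2.2).2.2,
          (popQ (popQ q1 q2).2.1 (popQ q1 q2).2.2).1 ≤ x := by
        intro x hx
        rw [happ2] at hx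
        rw [hb]
        exact minOf_le (List.mem_of_mem_erase hx)
      have hCnext := Cinv_next hab hCq hge hss1 hss2
      have hlen2 : (popQ (popQ q1 q2).2.1 (popQ q1 q2).2.2).2.1.length +
          ((popQ (popQ q1 q2).2.1 (popQ q1 q2).2.2).2.2 ++
            [(popQ q1 q2).1 + (popQ (popQ q1 q2).2.1 (popQ q1 q2).2.2).1]).length = n - 1 := by
        have := congrArg List.length happ2
        rw [List.length_erase_of_mem hbmem, hlen1] at this
        simp only [List.length_append, List.length_cons, List.length_nil] at this ⊢
        omega
      have hlt : n - 1 < n := by omega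
      have hsort2next : ((popQ (popQ q1 q2).2.1 (popQ q1 q2).2.2).2.2 ++
          [(popQ q1 q2).1 + (popQ (popQ q1 q2).2.1 (popQ q1 q2).2.2).1]).Pairwise
          (fun x y : Int => x ≤ y) := by
        rw [List.pairwise_append]
        refine ⟨hss2, List.pairwise_singleton _ _, ?_⟩
        intro x hx y hy; simp at hy; subst hy; exact hCq x hx
      rw [ih _ hlt _ _ _ hlen2 hss1 hsort2next hCnext]
      rw [← List.append_assoc, happ2]
    · have h' : ¬ 1 < (q1 ++ q2).length := by
        simp only [List.length_append]; omega
      simp only [dif_neg h, dif_neg h']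

-- ===== VERDICT (by name: the statement is the Claim_ definition above) =====
theorem reduce_sum_spec : Claim_equal_reduce_sum := by
  intro lst _
  unfold Spec_reduce_sum reduce_sum reduce_sum_alt
  have hperm : lst.Perm (PySem.List.sorted lst (fun x => x) false) :=
    (PySem.List.sorted_perm _ _ _).symm
  rw [loopA_perm lst.length 0 _ _ rfl hperm]
  have hsort : (PySem.List.sorted lst (fun x => x) false).Pairwise (fun x y : Int => x ≤ y) :=
    PySem.List.sorted_pairwise _ _
  rw [loopB2_eq_loopA ((PySem.List.sorted lst (fun x => x) false).length) 0 _ []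
    (by simp) hsort (List.Pairwise.nil) (Cinv_nil _)]
  simp
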